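-- pv_equiv track=rewrite | github.com/AlexanderFabisch/cythonwrapper | pywrap/cpptypeconv.py | _find_template_arg_indices
-- ===== SOURCE A (Python) =====
-- def _find_template_arg_indices(tname, indices=None, idx=0):
--     # TODO does not work with std::map<std::string, std::string>
--     if indices is None:
--         indices = [(0, len(tname))]
--
--     start = tname[idx:].find("<")
--     if start < 0:
--         return indices
--     else:
--         start += idx + 1
--
--     indices = _find_template_arg_indices(tname, indices, idx=start)
--     if len(tname) > indices[-1][1] > start:
--         end = indices[-1][1] + tname[indices[-1][1]:].find(">")
--     else:
--         end = start + tname[start:].find(">")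
--     indices.append((start, end))
--
--     return indices
-- ===== SOURCE B (Python) =====
-- def _find_template_arg_indices(tname, indices=None, idx=0):
--     # Phase 1: forward scan collecting the position just after every '<'.
--     starts = []
--     while True:
--         pos = tname[idx:].find("<")
--         if pos < 0:
--             break
--         idx = pos + idx + 1
--         starts.append(idx)
--     if indices is None:
--         indices = [(0, len(tname))]
--     # Phase 2: walk the starts innermost-first, tracking only the last end seen.
--     last_end = indices[-1][1] if starts else 0
--     pairs = []
--     for start in reversed(starts):
--         if len(tname) > last_end > start:
--             end = last_end + tname[last_end:].find(">")
--         else: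
--             end = start + tname[start:].find(">")
--         pairs.append((start, end))
--         last_end = end
--     indices.extend(pairs)
--     return indices
-- ===== Notes on version B (the rewrite author's own statement) =====
-- stated objective: alternative
-- what changed: Replaced A's recursion (append to the result list, re-read indices[-1] each unwind) by two explicit phases: a forward scan collecting all '<' start positions, then a reverse walk over them that threads a single scalar last_end and builds the new pairs as a separate list extended onto indices at the end.
-- outside the precondition, e.g. on _find_template_arg_indices('a<b>', [], 0): A raises IndexError, B raises IndexError
import Mathlib
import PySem

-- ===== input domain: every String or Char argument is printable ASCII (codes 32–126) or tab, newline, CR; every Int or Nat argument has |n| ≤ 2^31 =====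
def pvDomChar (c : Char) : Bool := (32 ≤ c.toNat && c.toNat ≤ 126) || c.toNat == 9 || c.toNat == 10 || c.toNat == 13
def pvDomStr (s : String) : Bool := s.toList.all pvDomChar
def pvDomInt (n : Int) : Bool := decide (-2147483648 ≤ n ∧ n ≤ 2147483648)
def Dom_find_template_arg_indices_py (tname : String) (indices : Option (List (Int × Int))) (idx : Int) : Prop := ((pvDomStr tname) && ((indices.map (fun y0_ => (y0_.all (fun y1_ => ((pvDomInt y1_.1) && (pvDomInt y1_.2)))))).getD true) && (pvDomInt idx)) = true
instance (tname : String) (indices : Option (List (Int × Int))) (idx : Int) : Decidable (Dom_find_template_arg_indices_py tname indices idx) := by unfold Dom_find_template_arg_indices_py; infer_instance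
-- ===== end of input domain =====

-- B replaces A's recursion (append to the list, re-read indices[-1]) by two explicit phases: a
-- forward scan collecting the '<' start positions, then a reverse walk over them that carries only
-- a scalar last_end and builds the new pairs as a separate list; alternative decomposition, same cost.
-- Equivalence is about the RETURN value; both Pythons append to the caller's list in place identically.

-- ===== PORT A =====

-- termination lemma for both scans: start = find + idx + 1 with find ≥ 0 decreases (len - idx).toNat
theorem ftai_measure_lt (s : List Char) (idx : Int)
    (h : ¬ PySem.Chars.find (PySem.Chars.slice s (some idx) none) ['<'] < 0) :
    ((s.length : Int) - (PySem.Chars.find (PySem.Chars.slice s (some idx) none) ['<'] + idx + 1)).toNat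
      < ((s.length : Int) - idx).toNat := by
  have hpos : 0 ≤ PySem.Chars.find (PySem.Chars.slice s (some idx) none) ['<'] := by omega
  by_cases hi : 0 ≤ idx
  · have hinf : ['<'] <:+: PySem.Chars.slice s (some idx) none :=
      (PySem.Chars.find_nonneg_iff _ _).mp hpos
    rw [PySem.Chars.slice_eq_listSlice, PySem.List.slice_from _ hi] at hinf
    have hne : s.drop idx.toNat ≠ [] := by
      intro hnil
      rw [hnil] at hinf
      exact absurd (List.eq_nil_of_infix_nil hinf) (by simp)
    have hlt : idx.toNat < s.length := by
      by_contra hge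
      exact hne (List.drop_eq_nil_of_le (by omega))
    omega
  · omega

def ftaiGo (s : List Char) (indices : List (Int × Int)) (idx : Int) : List (Int × Int) :=
  let pos := PySem.Chars.find (PySem.Chars.slice s (some idx) none) ['<']
  if h : pos < 0 then indices
  else
    let start := pos + idx + 1
    let indices' := ftaiGo s indices start
    -- indices'[-1]; Python raises IndexError when indices' = [] (excluded by Pre_); (0,0) is a dummy
    let lastEnd := ((PySem.List.pyGet? indices' (-1)).getD (0, 0)).2
    let e :=
      if (lastEnd < (s.length : Int)) ∧ (start < lastEnd) then
        lastEnd + PySem.Chars.find (PySem.Chars.slice s (some lastEnd) none) ['>']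
      else
        start + PySem.Chars.find (PySem.Chars.slice s (some start) none) ['>']
    indices' ++ [(start, e)]
  termination_by ((s.length : Int) - idx).toNat
  decreasing_by exact ftai_measure_lt s idx h

def find_template_arg_indices_py (tname : String) (indices : Option (List (Int × Int))) (idx : Int) : List (Int × Int) :=
  let s := tname.toList
  ftaiGo s (indices.getD [(0, (s.length : Int))]) idx

-- ===== PORT B =====

-- Phase 1: collect the start position after each '<', scanning forward.
def ftaiCollect (s : List Char) (idx : Int) : List Int :=
  let pos := PySem.Chars.find (PySem.Chars.slice s (some idx) none) ['<']
  if h : pos < 0 then []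
  else
    let start := pos + idx + 1
    start :: ftaiCollect s start
  termination_by ((s.length : Int) - idx).toNat
  decreasing_by exact ftai_measure_lt s idx h

-- Phase 2: the end for one start, given the last end computed so far.
def ftaiEnd (s : List Char) (lastEnd start : Int) : Int :=
  if (lastEnd < (s.length : Int)) ∧ (start < lastEnd) then
    lastEnd + PySem.Chars.find (PySem.Chars.slice s (some lastEnd) none) ['>']
  else
    start + PySem.Chars.find (PySem.Chars.slice s (some start) none) ['>']

-- Phase 2: build the pairs for the reversed starts, threading the scalar last_end.
def ftaiPairs (s : List Char) (lastEnd : Int) : List Int → List (Int × Int)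
  | [] => []
  | a :: rest =>
    let e := ftaiEnd s lastEnd a
    (a, e) :: ftaiPairs s e rest

def find_template_arg_indices_py_alt (tname : String) (indices : Option (List (Int × Int))) (idx : Int) : List (Int × Int) :=
  let s := tname.toList
  let starts := ftaiCollect s idx
  let init := indices.getD [(0, (s.length : Int))]
  -- init[-1][1] if starts else 0; Python raises IndexError when init = [] and starts ≠ [] (excluded by Pre_)
  let lastEnd := if starts.isEmpty then 0 else ((PySem.List.pyGet? init (-1)).getD (0, 0)).2
  init ++ ftaiPairs s lastEnd starts.reverse

-- ===== PRECONDITION & SPEC =====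
-- Pre_ excludes (a) an explicit empty indices list together with a '<' at or after idx, where both
-- Pythons raise IndexError on indices[-1], and (b) a '<' in tname with idx below -len(tname), where
-- A's recursion climbs from idx in small steps and can exceed Python's recursion limit
-- (RecursionError); near that boundary A may still return, and B agrees there (see cites).
def Pre_find_template_arg_indices_py (tname : String) (indices : Option (List (Int × Int))) (idx : Int) : Prop :=
  (indices = some [] → PySem.Str.isIn "<" (PySem.Str.slice tname (some idx) none) = false) ∧
  (PySem.Str.isIn "<" tname = true → -(PySem.Str.len tname) ≤ idx)

instance (tname : String) (indices : Option (List (Int × Int))) (idx : Int) : Decidable (Pre_find_template_arg_indices_py tname indices idx) := by unfold Pre_find_template_arg_indices_py; infer_instance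

def pvWitness_find_template_arg_indices_py : String × (Option (List (Int × Int))) × Int := ("v<i<x>>", none, 0)

def Spec_find_template_arg_indices_py (tname : String) (indices : Option (List (Int × Int))) (idx : Int) (out : List (Int × Int)) : Prop := out = find_template_arg_indices_py_alt tname indices idx
instance (tname : String) (indices : Option (List (Int × Int))) (idx : Int) (out : List (Int × Int)) : Decidable (Spec_find_template_arg_indices_py tname indices idx out) := by unfold Spec_find_template_arg_indices_py; infer_instance

-- ===== CLAIM (what is proved, stated in full; the proofs are below) =====
def Claim_equal_find_template_arg_indices_py : Prop := ∀ (tname : String) (indices : Option (List (Int × Int))) (idx : Int), Dom_find_template_arg_indices_py tname indices idx → Pre_find_template_arg_indices_py tname indices idx → Spec_find_template_arg_indices_py tname indices idx (find_template_arg_indices_py tname indices idx)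

-- ===== LEMMAS AND PROOFS =====

-- the last_end after processing a whole list of starts
def ftaiFinal (s : List Char) (lastEnd : Int) : List Int → Int
  | [] => lastEnd
  | a :: rest => ftaiFinal s (ftaiEnd s lastEnd a) rest

theorem ftaiPairs_snoc (s : List Char) (L a : Int) (xs : List Int) :
    ftaiPairs s L (xs ++ [a]) = ftaiPairs s L xs ++ [(a, ftaiEnd s (ftaiFinal s L xs) a)] := by
  induction xs generalizing L with
  | nil => rfl
  | cons x r ih => simp [ftaiPairs, ftaiFinal, ih]

-- the final last_end equals the end of the last pair
theorem ftaiFinal_snoc (s : List Char) (L b : Int) (ys : List Int) :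
    ftaiFinal s L (ys ++ [b]) = ftaiEnd s (ftaiFinal s L ys) b := by
  induction ys generalizing L with
  | nil => rfl
  | cons y r ih => simp [ftaiFinal, ih]

theorem pyGet_append_last (zs : List (Int × Int)) (p : Int × Int) :
    PySem.List.pyGet? (zs ++ [p]) (-1) = some p := by
  simp [PySem.List.pyGet?, PySem.List.pyIdx?]

-- the last element of init ++ pairs read via pyGet? (-1) is exactly the threaded last_end
theorem ftai_last (s : List Char) (init : List (Int × Int)) (xs : List Int) :
    ((PySem.List.pyGet? (init ++ ftaiPairs s (((PySem.List.pyGet? init (-1)).getD (0, 0)).2) xs) (-1)).getD (0, 0)).2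
      = ftaiFinal s (((PySem.List.pyGet? init (-1)).getD (0, 0)).2) xs := by
  rcases xs.eq_nil_or_concat with rfl | ⟨ys, b, rfl⟩
  · simp [ftaiPairs, ftaiFinal]
  · simp only [List.concat_eq_append]
    rw [ftaiPairs_snoc, ← List.append_assoc, pyGet_append_last, Option.getD_some, ftaiFinal_snoc]

-- A's recursion equals init ++ B's threaded pairs over the reversed starts
theorem ftaiGo_eq (s : List Char) (idx : Int) (init : List (Int × Int)) :
    ftaiGo s init idx
      = init ++ ftaiPairs s (((PySem.List.pyGet? init (-1)).getD (0, 0)).2) (ftaiCollect s idx).reverse := by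
  have main : ∀ n (idx : Int), ((s.length : Int) - idx).toNat = n →
      ftaiGo s init idx
        = init ++ ftaiPairs s (((PySem.List.pyGet? init (-1)).getD (0, 0)).2) (ftaiCollect s idx).reverse := by
    intro n
    induction n using Nat.strong_induction_on with
    | _ n ih =>
      intro idx hn
      rw [ftaiGo, ftaiCollect]
      by_cases hc : PySem.Chars.find (PySem.Chars.slice s (some idx) none) ['<'] < 0
      · rw [dif_pos hc, dif_pos hc]; simp [ftaiPairs]
      · rw [dif_neg hc, dif_neg hc]
        dsimp only
        rw [ih _ (hn ▸ ftai_measure_lt s idx hc) _ rfl, List.reverse_cons,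
          ftaiPairs_snoc, ← List.append_assoc, ftai_last]
        rfl
  exact main _ idx rfl

-- ===== VERDICT (by name: the statement is the Claim_ definition above) =====
theorem find_template_arg_indices_py_spec : Claim_equal_find_template_arg_indices_py := by
  intro tname indices idx _ _
  unfold Spec_find_template_arg_indices_py find_template_arg_indices_py find_template_arg_indices_py_alt
  rw [ftaiGo_eq]
  by_cases h : (ftaiCollect tname.toList idx).isEmpty
  · rw [List.isEmpty_iff] at h
    simp [h, ftaiPairs]
  · simp [h]
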